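-- pv_equiv track=rewrite | github.com/Trevmichi/process-extraction-kernel | src/conditions.py | _split_tokens_on_and
-- ===== SOURCE A (Python) =====
-- def _split_tokens_on_and(
--     tokens: list[tuple[str, str]],
-- ) -> list[list[tuple[str, str]]]:
--     """Split a token list on AND tokens.
--
--     Returns a list of token-segments (each segment is the tokens for one
--     comparison).  AND tokens are consumed and not included in any segment.
--     """
--     segments: list[list[tuple[str, str]]] = []
--     current: list[tuple[str, str]] = []
--     for tok in tokens:
--         if tok[0] == "AND":
--             segments.append(current)
--             current = []
--         else:
--             current.append(tok)
--     segments.append(current)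
--     return segments
-- ===== SOURCE B (Python) =====
-- def _split_tokens_on_and(
--     tokens: list[tuple[str, str]],
-- ) -> list[list[tuple[str, str]]]:
--     """Split a token list on AND tokens (index-then-slice)."""
--     cuts = [i for i, tok in enumerate(tokens) if tok[0] == "AND"]
--     bounds = [-1] + cuts + [len(tokens)]
--     return [tokens[lo + 1:hi] for lo, hi in zip(bounds, bounds[1:])]
-- ===== Notes on version B (the rewrite author's own statement) =====
-- stated objective: alternative
-- what changed: B first collects the indices of AND tokens, then builds each segment by slicing between consecutive cut positions, instead of A's token-by-token accumulator loop.
import Mathlib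
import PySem

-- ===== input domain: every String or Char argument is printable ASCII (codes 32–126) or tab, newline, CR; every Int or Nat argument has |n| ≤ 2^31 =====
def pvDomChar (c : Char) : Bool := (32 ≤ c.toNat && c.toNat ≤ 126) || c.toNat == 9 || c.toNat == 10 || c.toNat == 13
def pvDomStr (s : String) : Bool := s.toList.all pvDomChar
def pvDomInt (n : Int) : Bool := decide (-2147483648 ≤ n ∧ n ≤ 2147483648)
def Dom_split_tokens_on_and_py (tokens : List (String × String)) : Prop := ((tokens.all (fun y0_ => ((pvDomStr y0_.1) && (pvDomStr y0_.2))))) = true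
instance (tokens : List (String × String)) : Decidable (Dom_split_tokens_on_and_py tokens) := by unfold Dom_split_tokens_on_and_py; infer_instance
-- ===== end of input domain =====

-- B computes the AND cut positions first and then slices out each segment,
-- instead of A's token-by-token accumulator loop (objective: alternative decomposition, same cost).

-- ===== PORT A =====
def split_tokens_on_and_py (tokens : List (String × String)) : List (List (String × String)) :=
  let st := tokens.foldl
    (fun (st : List (List (String × String)) × List (String × String)) tok =>
      if tok.1 == "AND" then (st.1 ++ [st.2], [])
      else (st.1, st.2 ++ [tok]))
    ([], [])
  st.1 ++ [st.2]

-- ===== PORT B =====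
def split_tokens_on_and_py_alt (tokens : List (String × String)) : List (List (String × String)) :=
  let cuts : List Int :=
    ((PySem.List.enumerate tokens).filter (fun p => p.2.1 == "AND")).map (fun p => p.1)
  let bounds : List Int := -1 :: (cuts ++ [(tokens.length : Int)])
  (bounds.zip bounds.tail).map
    (fun p => PySem.List.slice tokens (some (p.1 + 1)) (some p.2))

-- ===== PRECONDITION & SPEC =====
def Spec_split_tokens_on_and_py (tokens : List (String × String)) (out : List (List (String × String))) : Prop := out = split_tokens_on_and_py_alt tokens
instance (tokens : List (String × String)) (out : List (List (String × String))) : Decidable (Spec_split_tokens_on_and_py tokens out) := by unfold Spec_split_tokens_on_and_py; infer_instance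

-- ===== CLAIM (what is proved, stated in full; the proofs are below) =====
def Claim_equal_split_tokens_on_and_py : Prop := ∀ (tokens : List (String × String)), Dom_split_tokens_on_and_py tokens → Spec_split_tokens_on_and_py tokens (split_tokens_on_and_py tokens)

-- ===== LEMMAS AND PROOFS =====

-- Common reference form: the straightforward structural splitter.
def pvGo : List (String × String) → List (List (String × String))
  | [] => [[]]
  | t :: ts => if t.1 == "AND" then [] :: pvGo ts else (pvGo ts).modifyHead (t :: ·)

theorem pvGo_ne_nil (ts : List (String × String)) : pvGo ts ≠ [] := by
  cases ts with
  | nil => simp [pvGo]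
  | cons t ts =>
    simp only [pvGo]
    split
    · simp
    · cases h : pvGo ts with
      | nil => exact absurd h (pvGo_ne_nil ts)
      | cons a l => simp

theorem pvGo_cons_headI_tail (ts : List (String × String)) :
    (pvGo ts).headI :: (pvGo ts).tail = pvGo ts := by
  cases h : pvGo ts with
  | nil => exact absurd h (pvGo_ne_nil ts)
  | cons a l => rfl

-- ---- A-side: accumulator-loop invariant ----
theorem a_loop (ts : List (String × String))
    (segs : List (List (String × String))) (cur : List (String × String)) :
    (let st := ts.foldl
      (fun (st : List (List (String × String)) × List (String × String)) tok =>
        if tok.1 == "AND" then (st.1 ++ [st.2], [])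
        else (st.1, st.2 ++ [tok])) (segs, cur)
     st.1 ++ [st.2]) = segs ++ ((cur ++ (pvGo ts).headI) :: (pvGo ts).tail) := by
  induction ts generalizing segs cur with
  | nil => simp [pvGo]
  | cons t ts ih =>
    simp only [List.foldl_cons, pvGo]
    by_cases h : t.1 == "AND"
    · simp only [h, if_pos]
      rw [ih]
      simp [pvGo_cons_headI_tail ts]
    · simp only [h, if_neg, Bool.false_eq_true, not_false_iff]
      rw [ih]
      cases hg : pvGo ts with
      | nil => exact absurd hg (pvGo_ne_nil ts)
      | cons a l => simp [List.append_assoc]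

theorem a_eq_go (ts : List (String × String)) : split_tokens_on_and_py ts = pvGo ts := by
  have := a_loop ts [] []
  simp only [List.nil_append] at this
  simpa [split_tokens_on_and_py, pvGo_cons_headI_tail ts] using this

-- ---- B-side ----
def pvCuts0 (ts : List (String × String)) : List Int :=
  ((PySem.List.enumerate ts).filter (fun p => p.2.1 == "AND")).map (fun p => p.1)

def pvSegs (xs : List (String × String)) (u : List Int) : List (List (String × String)) :=
  ((-1 :: u).zip u).map (fun p => PySem.List.slice xs (some (p.1 + 1)) (some p.2))

theorem enum_shift (ts : List (String × String)) (s : Int) :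
    PySem.List.enumerate ts (s + 1) = (PySem.List.enumerate ts s).map (fun p => (p.1 + 1, p.2)) := by
  induction ts generalizing s with
  | nil => simp [PySem.List.enumerate]
  | cons t ts ih => simp [PySem.List.enumerate_cons, ih]

theorem cuts_cons (t : String × String) (ts : List (String × String)) :
    pvCuts0 (t :: ts) = (if t.1 == "AND" then [(0 : Int)] else []) ++ (pvCuts0 ts).map (· + 1) := by
  simp only [pvCuts0, PySem.List.enumerate_cons]
  rw [show (0 : Int) + 1 = 0 + 1 from rfl, enum_shift ts 0]
  by_cases h : t.1 == "AND" <;>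
    simp [h, List.filter_map, List.map_map, Function.comp_def]

theorem cuts_nonneg (ts : List (String × String)) : ∀ c ∈ pvCuts0 ts, 0 ≤ c := by
  induction ts with
  | nil => simp [pvCuts0, PySem.List.enumerate]
  | cons t ts ih =>
    intro c hc
    rw [cuts_cons] at hc
    rcases List.mem_append.mp hc with h1 | h2
    · split at h1 <;> simp_all
    · rcases List.mem_map.mp h2 with ⟨c', hc', rfl⟩
      have := ih c' hc'
      omega

-- slice shift lemmas (proved via PySem.List.slice_natCast)
theorem slice_cons_shift (x : String × String) (xs : List (String × String)) {a b : Int}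
    (ha : 0 ≤ a) (hb : 0 ≤ b) :
    PySem.List.slice (x :: xs) (some (a + 1)) (some (b + 1)) =
      PySem.List.slice xs (some a) (some b) := by
  obtain ⟨m, rfl⟩ : ∃ m : Nat, a = (m : Int) := ⟨a.toNat, (Int.toNat_of_nonneg ha).symm⟩
  obtain ⟨k, rfl⟩ : ∃ k : Nat, b = (k : Int) := ⟨b.toNat, (Int.toNat_of_nonneg hb).symm⟩
  rw [show ((m : Int) + 1) = ((m + 1 : Nat) : Int) by push_cast; ring,
      show ((k : Int) + 1) = ((k + 1 : Nat) : Int) by push_cast; ring,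
      PySem.List.slice_natCast, PySem.List.slice_natCast]
  simp [Nat.succ_sub_succ]

theorem slice_cons_zero (x : String × String) (xs : List (String × String)) {b : Int}
    (hb : 0 ≤ b) :
    PySem.List.slice (x :: xs) (some 0) (some (b + 1)) =
      x :: PySem.List.slice xs (some 0) (some b) := by
  obtain ⟨k, rfl⟩ : ∃ k : Nat, b = (k : Int) := ⟨b.toNat, (Int.toNat_of_nonneg hb).symm⟩
  rw [show ((k : Int) + 1) = ((k + 1 : Nat) : Int) by push_cast; ring,
      show (0 : Int) = ((0 : Nat) : Int) from rfl,
      PySem.List.slice_natCast, PySem.List.slice_natCast]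
  simp

theorem pvSegs_and (t : String × String) (ts : List (String × String)) (u : List Int)
    (hu : ∀ c ∈ u, 0 ≤ c) :
    pvSegs (t :: ts) (0 :: u.map (· + 1)) = [] :: pvSegs ts u := by
  simp only [pvSegs, List.zip_cons_cons, List.map_cons]
  congr 1
  rw [show (0 : Int) :: u.map (· + 1) = ((-1 : Int) :: u).map (· + 1) by simp,
      List.zip_map]
  rw [List.map_map]
  apply List.map_congr_left
  intro p hp
  obtain ⟨hp1, hp2⟩ := List.of_mem_zip hp
  have h1 : 0 ≤ p.1 + 1 := by
    rcases List.mem_cons.mp hp1 with h | h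
    · omega
    · have := hu _ h; omega
  have h2 : 0 ≤ p.2 := hu _ hp2
  simp only [Function.comp_def, Prod.map]
  exact slice_cons_shift t ts h1 h2

theorem pvSegs_cons (t : String × String) (ts : List (String × String)) (u : List Int)
    (hu : ∀ c ∈ u, 0 ≤ c) :
    pvSegs (t :: ts) (u.map (· + 1)) = (pvSegs ts u).modifyHead (t :: ·) := by
  cases u with
  | nil => simp [pvSegs]
  | cons u0 u' =>
    have hu0 : 0 ≤ u0 := hu u0 (by simp)
    simp only [List.map_cons, pvSegs, List.zip_cons_cons, List.map_cons, List.modifyHead_cons]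
    congr 1
    · rw [show (-1 : Int) + 1 = 0 from rfl]
      exact slice_cons_zero t ts hu0
    · rw [show ((u0 + 1) :: u'.map (· + 1) : List Int) = (u0 :: u').map (· + 1) by simp, List.zip_map,
          List.map_map]
      apply List.map_congr_left
      intro p hp
      obtain ⟨hp1, hp2⟩ := List.of_mem_zip hp
      have h1 : 0 ≤ p.1 := hu _ hp1
      have h2 : 0 ≤ p.2 := hu _ (List.mem_cons_of_mem u0 hp2)
      simp only [Function.comp_def, Prod.map]
      exact slice_cons_shift t ts (by omega) h2

theorem alt_eq_segs (ts : List (String × String)) :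
    split_tokens_on_and_py_alt ts = pvSegs ts (pvCuts0 ts ++ [(ts.length : Int)]) := rfl

theorem bounds_nonneg (ts : List (String × String)) :
    ∀ c ∈ pvCuts0 ts ++ [(ts.length : Int)], 0 ≤ c := by
  intro c hc
  rcases List.mem_append.mp hc with h | h
  · exact cuts_nonneg ts c h
  · simp at h; omega

theorem alt_eq_go (ts : List (String × String)) : split_tokens_on_and_py_alt ts = pvGo ts := by
  induction ts with
  | nil => rfl
  | cons t ts ih =>
    rw [alt_eq_segs, pvGo]
    rw [cuts_cons]
    by_cases h : t.1 == "AND"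
    · simp only [h, if_pos, List.cons_append, List.nil_append]
      rw [show (pvCuts0 ts).map (· + 1) ++ [((t :: ts).length : Int)] =
            (pvCuts0 ts ++ [(ts.length : Int)]).map (· + 1) by simp]
      rw [pvSegs_and t ts _ (bounds_nonneg ts), ← alt_eq_segs, ih]
    · simp only [h, Bool.false_eq_true, if_false, List.nil_append]
      rw [show (pvCuts0 ts).map (· + 1) ++ [((t :: ts).length : Int)] =
            (pvCuts0 ts ++ [(ts.length : Int)]).map (· + 1) by simp]
      rw [pvSegs_cons t ts _ (bounds_nonneg ts), ← alt_eq_segs, ih]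

-- ===== VERDICT (by name: the statement is the Claim_ definition above) =====
theorem split_tokens_on_and_py_spec : Claim_equal_split_tokens_on_and_py := by
  intro tokens _
  unfold Spec_split_tokens_on_and_py
  rw [a_eq_go, alt_eq_go]
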